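-- pv_equiv track=rewrite | github.com/sassyYoda/pythia2OPT_6.7b-50k-vocab | relrep_eval/analyze_gold_agreement.py | analyze_gold_agreement
-- ===== SOURCE A (Python) =====
-- def analyze_gold_agreement(align_relrep, align_vanilla, gold_mappings):
--     """Analyze agreement with gold mappings."""
--     categories = {
--         'both_correct': 0,
--         'only_relrep_correct': 0,
--         'only_vanilla_correct': 0,
--         'both_wrong': 0,
--         'both_wrong_but_agree': 0,
--         'both_wrong_and_disagree': 0
--     }
--
--     for target_id, gold_source in gold_mappings.items():
--         if target_id not in align_relrep or target_id not in align_vanilla: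
--             continue
--
--         relrep_source = align_relrep[target_id]
--         vanilla_source = align_vanilla[target_id]
--
--         relrep_correct = (relrep_source == gold_source)
--         vanilla_correct = (vanilla_source == gold_source)
--
--         if relrep_correct and vanilla_correct:
--             categories['both_correct'] += 1
--         elif relrep_correct and not vanilla_correct:
--             categories['only_relrep_correct'] += 1
--         elif not relrep_correct and vanilla_correct:
--             categories['only_vanilla_correct'] += 1
--         else:  # both wrong
--             categories['both_wrong'] += 1
--             if relrep_source == vanilla_source:
--                 categories['both_wrong_but_agree'] += 1
--             else:
--                 categories['both_wrong_and_disagree'] += 1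
--
--     return categories
-- ===== SOURCE B (Python) =====
-- def analyze_gold_agreement(align_relrep, align_vanilla, gold_mappings):
--     """Analyze agreement with gold mappings."""
--     valid = [(gold, align_relrep[t], align_vanilla[t])
--              for t, gold in gold_mappings.items()
--              if t in align_relrep and t in align_vanilla]
--     return {
--         'both_correct': sum(1 for g, r, v in valid if r == g and v == g),
--         'only_relrep_correct': sum(1 for g, r, v in valid if r == g and v != g),
--         'only_vanilla_correct': sum(1 for g, r, v in valid if r != g and v == g),
--         'both_wrong': sum(1 for g, r, v in valid if r != g and v != g),
--         'both_wrong_but_agree': sum(1 for g, r, v in valid if r != g and v != g and r == v),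
--         'both_wrong_and_disagree': sum(1 for g, r, v in valid if r != g and v != g and r != v),
--     }
-- ===== Notes on version B (the rewrite author's own statement) =====
-- stated objective: alternative
-- what changed: Replaces the single stateful loop that branches into a mutable six-counter dict with one filtering pass that materialises the valid (gold, relrep, vanilla) triples, followed by six independent generator-sum counts assembled directly into the result dict literal.
import Mathlib
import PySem

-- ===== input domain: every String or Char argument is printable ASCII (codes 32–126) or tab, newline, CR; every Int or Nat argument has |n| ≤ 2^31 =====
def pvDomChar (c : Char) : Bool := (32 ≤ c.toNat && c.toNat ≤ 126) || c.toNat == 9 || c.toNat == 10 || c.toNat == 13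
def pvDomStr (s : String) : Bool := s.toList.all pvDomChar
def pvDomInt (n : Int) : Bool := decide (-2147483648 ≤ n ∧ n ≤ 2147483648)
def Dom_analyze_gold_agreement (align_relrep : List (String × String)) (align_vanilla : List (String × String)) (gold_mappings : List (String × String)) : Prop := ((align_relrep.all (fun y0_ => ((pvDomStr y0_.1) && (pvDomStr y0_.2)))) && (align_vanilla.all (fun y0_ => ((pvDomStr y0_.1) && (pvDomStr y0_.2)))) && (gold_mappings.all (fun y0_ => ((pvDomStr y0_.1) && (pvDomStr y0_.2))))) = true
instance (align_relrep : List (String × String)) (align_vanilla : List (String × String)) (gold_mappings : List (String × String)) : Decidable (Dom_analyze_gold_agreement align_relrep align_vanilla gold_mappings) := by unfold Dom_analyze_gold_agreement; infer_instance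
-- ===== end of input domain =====

-- B replaces A's single branching loop over a mutable six-counter dict by one filtering
-- pass that collects the valid (gold, relrep, vanilla) triples and six independent counts
-- assembled into the result dict literal (objective: alternative decomposition, same cost).


-- ===== PORT A =====
-- the loop body of A: one gold item updates the categories dict
def agaStepA (dr dv : PySem.Dict String String) (c : PySem.Dict String Int)
    (p : String × String) : PySem.Dict String Int :=
  match dr.get? p.1, dv.get? p.1 with
  | some relrep_source, some vanilla_source =>
    let relrep_correct := relrep_source == p.2
    let vanilla_correct := vanilla_source == p.2
    if relrep_correct && vanilla_correct then
      c.insert "both_correct" (c.getD "both_correct" 0 + 1)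
    else if relrep_correct && !vanilla_correct then
      c.insert "only_relrep_correct" (c.getD "only_relrep_correct" 0 + 1)
    else if !relrep_correct && vanilla_correct then
      c.insert "only_vanilla_correct" (c.getD "only_vanilla_correct" 0 + 1)
    else
      let c1 := c.insert "both_wrong" (c.getD "both_wrong" 0 + 1)
      if relrep_source == vanilla_source then
        c1.insert "both_wrong_but_agree" (c1.getD "both_wrong_but_agree" 0 + 1)
      else
        c1.insert "both_wrong_and_disagree" (c1.getD "both_wrong_and_disagree" 0 + 1)
  | _, _ => c  -- 'continue' when target_id missing from either alignment

def analyze_gold_agreement (align_relrep : List (String × String)) (align_vanilla : List (String × String)) (gold_mappings : List (String × String)) : List (String × Int) :=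
  let dr := PySem.Dict.ofList align_relrep
  let dv := PySem.Dict.ofList align_vanilla
  let categories : PySem.Dict String Int := PySem.Dict.ofList
    [("both_correct", 0), ("only_relrep_correct", 0), ("only_vanilla_correct", 0),
     ("both_wrong", 0), ("both_wrong_but_agree", 0), ("both_wrong_and_disagree", 0)]
  ((PySem.Dict.ofList gold_mappings).items.foldl (agaStepA dr dv) categories).items

-- ===== PORT B =====
def analyze_gold_agreement_alt (align_relrep : List (String × String)) (align_vanilla : List (String × String)) (gold_mappings : List (String × String)) : List (String × Int) :=
  let dr := PySem.Dict.ofList align_relrep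
  let dv := PySem.Dict.ofList align_vanilla
  let valid : List (String × String × String) :=
    (PySem.Dict.ofList gold_mappings).items.filterMap (fun p =>
      match dr.get? p.1, dv.get? p.1 with
      | some r, some v => some (p.2, r, v)
      | _, _ => none)
  [("both_correct", (valid.countP (fun t => t.2.1 == t.1 && t.2.2 == t.1) : Int)),
   ("only_relrep_correct", (valid.countP (fun t => t.2.1 == t.1 && !(t.2.2 == t.1)) : Int)),
   ("only_vanilla_correct", (valid.countP (fun t => !(t.2.1 == t.1) && t.2.2 == t.1) : Int)),
   ("both_wrong", (valid.countP (fun t => !(t.2.1 == t.1) && !(t.2.2 == t.1)) : Int)),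
   ("both_wrong_but_agree", (valid.countP (fun t => !(t.2.1 == t.1) && !(t.2.2 == t.1) && t.2.1 == t.2.2) : Int)),
   ("both_wrong_and_disagree", (valid.countP (fun t => !(t.2.1 == t.1) && !(t.2.2 == t.1) && !(t.2.1 == t.2.2)) : Int))]

-- ===== PRECONDITION & SPEC =====
def Spec_analyze_gold_agreement (align_relrep : List (String × String)) (align_vanilla : List (String × String)) (gold_mappings : List (String × String)) (out : List (String × Int)) : Prop := out = analyze_gold_agreement_alt align_relrep align_vanilla gold_mappings
instance (align_relrep : List (String × String)) (align_vanilla : List (String × String)) (gold_mappings : List (String × String)) (out : List (String × Int)) : Decidable (Spec_analyze_gold_agreement align_relrep align_vanilla gold_mappings out) := by unfold Spec_analyze_gold_agreement; infer_instance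

-- ===== CLAIM (what is proved, stated in full; the proofs are below) =====
def Claim_equal_analyze_gold_agreement : Prop := ∀ (align_relrep : List (String × String)) (align_vanilla : List (String × String)) (gold_mappings : List (String × String)), Dom_analyze_gold_agreement align_relrep align_vanilla gold_mappings → Spec_analyze_gold_agreement align_relrep align_vanilla gold_mappings (analyze_gold_agreement align_relrep align_vanilla gold_mappings)

-- ===== LEMMAS AND PROOFS =====

-- the six branch predicates on a valid triple (gold, relrep, vanilla)
def agaQ1 (t : String × String × String) : Bool := t.2.1 == t.1 && t.2.2 == t.1
def agaQ2 (t : String × String × String) : Bool := t.2.1 == t.1 && !(t.2.2 == t.1)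
def agaQ3 (t : String × String × String) : Bool := !(t.2.1 == t.1) && t.2.2 == t.1
def agaQ4 (t : String × String × String) : Bool := !(t.2.1 == t.1) && !(t.2.2 == t.1)
def agaQ5 (t : String × String × String) : Bool := !(t.2.1 == t.1) && !(t.2.2 == t.1) && t.2.1 == t.2.2
def agaQ6 (t : String × String × String) : Bool := !(t.2.1 == t.1) && !(t.2.2 == t.1) && !(t.2.1 == t.2.2)

def agaDict (a b c d e f : Int) : PySem.Dict String Int :=
  PySem.Dict.mk
    [("both_correct", a), ("only_relrep_correct", b), ("only_vanilla_correct", c),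
     ("both_wrong", d), ("both_wrong_but_agree", e), ("both_wrong_and_disagree", f)]

def agaValid (dr dv : PySem.Dict String String) (l : List (String × String)) :
    List (String × String × String) :=
  l.filterMap (fun p =>
    match dr.get? p.1, dv.get? p.1 with
    | some r, some v => some (p.2, r, v)
    | _, _ => none)

theorem agaLoop (dr dv : PySem.Dict String String) (l : List (String × String))
    (a b c d e f : Int) :
    l.foldl (agaStepA dr dv) (agaDict a b c d e f) =
      agaDict (a + ((agaValid dr dv l).countP agaQ1 : Int))
              (b + ((agaValid dr dv l).countP agaQ2 : Int))
              (c + ((agaValid dr dv l).countP agaQ3 : Int))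
              (d + ((agaValid dr dv l).countP agaQ4 : Int))
              (e + ((agaValid dr dv l).countP agaQ5 : Int))
              (f + ((agaValid dr dv l).countP agaQ6 : Int)) := by
  induction l generalizing a b c d e f with
  | nil => simp [agaValid]
  | cons p l ih =>
    rcases p with ⟨tid, gold⟩
    simp only [List.foldl_cons]
    rcases hr : dr.get? tid with _ | r
    · have hstep : agaStepA dr dv (agaDict a b c d e f) (tid, gold) = agaDict a b c d e f := by
        simp [agaStepA, hr]
      have hv : agaValid dr dv ((tid, gold) :: l) = agaValid dr dv l := by
        simp [agaValid, hr]
      rw [hstep, hv]; exact ih a b c d e f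
    · rcases hv : dv.get? tid with _ | v
      · have hstep : agaStepA dr dv (agaDict a b c d e f) (tid, gold) = agaDict a b c d e f := by
          simp only [agaStepA, hr, hv]
        have hva : agaValid dr dv ((tid, gold) :: l) = agaValid dr dv l := by
          simp [agaValid, hr, hv]
        rw [hstep, hva]; exact ih a b c d e f
      · have hva : agaValid dr dv ((tid, gold) :: l) =
            (gold, r, v) :: agaValid dr dv l := by
          simp [agaValid, hr, hv]
        rw [hva]
        by_cases h1 : (r == gold) = true
        · by_cases h2 : (v == gold) = true
          · have hstep : agaStepA dr dv (agaDict a b c d e f) (tid, gold) =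
                agaDict (a + 1) b c d e f := by
              simp only [agaStepA, hr, hv]
              simp [h1, h2, agaDict, PySem.Dict.insert, PySem.Dict.getD,
                PySem.Dict.get?, PySem.Dict.contains]
            rw [hstep, ih]
            simp [agaQ1, agaQ2, agaQ3, agaQ4, agaQ5, agaQ6, h1, h2, agaDict]
            omega
          · have hstep : agaStepA dr dv (agaDict a b c d e f) (tid, gold) =
                agaDict a (b + 1) c d e f := by
              simp only [agaStepA, hr, hv]
              simp [h1, h2, agaDict, PySem.Dict.insert, PySem.Dict.getD,
                PySem.Dict.get?, PySem.Dict.contains]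
            rw [hstep, ih]
            simp [agaQ1, agaQ2, agaQ3, agaQ4, agaQ5, agaQ6, h1, h2, agaDict]
            omega
        · by_cases h2 : (v == gold) = true
          · have hstep : agaStepA dr dv (agaDict a b c d e f) (tid, gold) =
                agaDict a b (c + 1) d e f := by
              simp only [agaStepA, hr, hv]
              simp [h1, h2, agaDict, PySem.Dict.insert, PySem.Dict.getD,
                PySem.Dict.get?, PySem.Dict.contains]
            rw [hstep, ih]
            simp [agaQ1, agaQ2, agaQ3, agaQ4, agaQ5, agaQ6, h1, h2, agaDict]
            omega
          · by_cases h3 : (r == v) = true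
            · have hstep : agaStepA dr dv (agaDict a b c d e f) (tid, gold) =
                  agaDict a b c (d + 1) (e + 1) f := by
                simp only [agaStepA, hr, hv]
                simp [h1, h2, h3, agaDict, PySem.Dict.insert, PySem.Dict.getD,
                  PySem.Dict.get?, PySem.Dict.contains]
              rw [hstep, ih]
              simp [agaQ1, agaQ2, agaQ3, agaQ4, agaQ5, agaQ6, h1, h2, h3, agaDict]
              omega
            · have hstep : agaStepA dr dv (agaDict a b c d e f) (tid, gold) =
                  agaDict a b c (d + 1) e (f + 1) := by
                simp only [agaStepA, hr, hv]
                simp [h1, h2, h3, agaDict, PySem.Dict.insert, PySem.Dict.getD,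
                  PySem.Dict.get?, PySem.Dict.contains]
              rw [hstep, ih]
              simp [agaQ1, agaQ2, agaQ3, agaQ4, agaQ5, agaQ6, h1, h2, h3, agaDict]
              omega

-- ===== VERDICT (by name: the statement is the Claim_ definition above) =====
theorem analyze_gold_agreement_spec : Claim_equal_analyze_gold_agreement := by
  intro ar av gm _
  unfold Spec_analyze_gold_agreement analyze_gold_agreement analyze_gold_agreement_alt
  have h0 : (PySem.Dict.ofList
      [("both_correct", (0:Int)), ("only_relrep_correct", 0), ("only_vanilla_correct", 0),
       ("both_wrong", 0), ("both_wrong_but_agree", 0), ("both_wrong_and_disagree", 0)]) =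
      agaDict 0 0 0 0 0 0 := by decide
  simp only [h0, agaLoop]
  simp [agaDict, agaValid]
  exact ⟨rfl, rfl, rfl, rfl, rfl, rfl⟩
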